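-- pv_equiv track=rewrite | github.com/LUISNAAL8435/Lenguaje | OptimizadorTac.py | eliminar_codigo_inaccesible
-- ===== SOURCE A (Python) =====
-- def eliminar_codigo_inaccesible(cuadruplas):
--     """Elimina código después de un return no condicional"""
--     nuevas = []
--     encontro_return = False
--
--     for op, arg1, arg2, res in cuadruplas:
--         if encontro_return and op != 'L0:' and op != 'L1:':
--             # Saltar código después de return
--             continue
--
--         if op == 'return':
--             encontro_return = True
--
--         nuevas.append((op, arg1, arg2, res))
--
--     return nuevas
-- ===== SOURCE B (Python) =====
-- def eliminar_codigo_inaccesible(cuadruplas):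
--     """Elimina código después de un return no condicional"""
--     cuads = [(op, arg1, arg2, res) for op, arg1, arg2, res in cuadruplas]
--     for i, q in enumerate(cuads):
--         if q[0] == 'return':
--             return cuads[:i + 1] + [r for r in cuads[i + 1:] if r[0] in ('L0:', 'L1:')]
--     return cuads
-- ===== Notes on version B (the rewrite author's own statement) =====
-- stated objective: alternative
-- what changed: Replaced the stateful flag-driven single pass with a locate-split decomposition: find the first 'return' quadruple, keep the prefix through it, and filter the tail for label quadruples.
import Mathlib
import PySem

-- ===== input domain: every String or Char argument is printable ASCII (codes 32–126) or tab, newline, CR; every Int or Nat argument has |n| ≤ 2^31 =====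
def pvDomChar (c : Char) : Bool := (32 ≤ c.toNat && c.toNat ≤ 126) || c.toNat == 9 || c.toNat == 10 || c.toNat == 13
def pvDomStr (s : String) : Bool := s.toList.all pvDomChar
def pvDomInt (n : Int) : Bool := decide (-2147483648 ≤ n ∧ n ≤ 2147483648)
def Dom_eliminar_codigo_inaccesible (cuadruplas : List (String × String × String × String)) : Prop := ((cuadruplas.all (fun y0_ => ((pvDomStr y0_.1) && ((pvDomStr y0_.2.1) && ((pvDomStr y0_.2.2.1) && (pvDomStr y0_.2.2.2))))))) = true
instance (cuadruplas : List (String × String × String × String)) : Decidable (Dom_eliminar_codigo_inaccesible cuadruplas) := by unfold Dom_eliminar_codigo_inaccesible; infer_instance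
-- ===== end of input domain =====

-- B replaces A's flag-driven single pass by a locate-first-return then slice-and-filter decomposition (same cost, alternative structure).


-- ===== PORT A =====
-- A: one pass with accumulator `nuevas` and flag `encontro_return`; the loop body is pvStepA.
def pvStepA (st : List (String × String × String × String) × Bool) (q : String × String × String × String) : List (String × String × String × String) × Bool :=
  if st.2 && q.1 != "L0:" && q.1 != "L1:" then st
  else (st.1 ++ [(q.1, q.2.1, q.2.2.1, q.2.2.2)],
        if q.1 == "return" then true else st.2)

def eliminar_codigo_inaccesible (cuadruplas : List (String × String × String × String)) : List (String × String × String × String) :=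
  (cuadruplas.foldl pvStepA ([], false)).1

-- ===== PORT B =====
-- B's scan: locate the first 'return'; keep prefix through it, filter the tail for labels.
def pvAltGo (l : List (String × String × String × String)) : List (String × String × String × String) :=
  match l with
  | [] => []
  | q :: rest =>
    if q.1 == "return" then
      q :: rest.filter (fun r => r.1 == "L0:" || r.1 == "L1:")
    else
      q :: pvAltGo rest

def eliminar_codigo_inaccesible_alt (cuadruplas : List (String × String × String × String)) : List (String × String × String × String) :=
  pvAltGo (cuadruplas.map (fun q => (q.1, q.2.1, q.2.2.1, q.2.2.2)))

-- ===== PRECONDITION & SPEC =====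
def Spec_eliminar_codigo_inaccesible (cuadruplas : List (String × String × String × String)) (out : List (String × String × String × String)) : Prop := out = eliminar_codigo_inaccesible_alt cuadruplas
instance (cuadruplas : List (String × String × String × String)) (out : List (String × String × String × String)) : Decidable (Spec_eliminar_codigo_inaccesible cuadruplas out) := by unfold Spec_eliminar_codigo_inaccesible; infer_instance

-- ===== CLAIM (what is proved, stated in full; the proofs are below) =====
def Claim_equal_eliminar_codigo_inaccesible : Prop := ∀ (cuadruplas : List (String × String × String × String)), Dom_eliminar_codigo_inaccesible cuadruplas → Spec_eliminar_codigo_inaccesible cuadruplas (eliminar_codigo_inaccesible cuadruplas)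

-- ===== LEMMAS AND PROOFS =====

theorem pvFoldA_true (l : List (String × String × String × String)) (acc : List (String × String × String × String)) :
    l.foldl pvStepA (acc, true)
      = (acc ++ (l.map (fun q => (q.1, q.2.1, q.2.2.1, q.2.2.2))).filter (fun r => r.1 == "L0:" || r.1 == "L1:"), true) := by
  induction l generalizing acc with
  | nil => simp
  | cons q rest ih =>
    obtain ⟨a, b, c, d⟩ := q
    by_cases h0 : a = "L0:"
    · simp [pvStepA, h0, ih]
    · by_cases h1 : a = "L1:"
      · simp [pvStepA, h1, ih]
      · simp [pvStepA, h0, h1, ih]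

theorem pvFoldA_false (l : List (String × String × String × String)) (acc : List (String × String × String × String)) :
    (l.foldl pvStepA (acc, false)).1
      = acc ++ pvAltGo (l.map (fun q => (q.1, q.2.1, q.2.2.1, q.2.2.2))) := by
  induction l generalizing acc with
  | nil => simp [pvAltGo]
  | cons q rest ih =>
    obtain ⟨a, b, c, d⟩ := q
    by_cases hr : a = "return"
    · simp [pvStepA, hr, pvAltGo, pvFoldA_true]
    · simp [pvStepA, hr, pvAltGo, ih]

-- ===== VERDICT (by name: the statement is the Claim_ definition above) =====
theorem eliminar_codigo_inaccesible_spec : Claim_equal_eliminar_codigo_inaccesible := by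
  intro cuadruplas _
  unfold Spec_eliminar_codigo_inaccesible eliminar_codigo_inaccesible eliminar_codigo_inaccesible_alt
  simpa using pvFoldA_false cuadruplas []
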